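-- pv_equiv track=rewrite | github.com/mickael266/AlgoExpertQuestions | find_min_shipment.py | find_min_shipments
-- ===== SOURCE A (Python) =====
-- def build_min_shipments_dict(l: list[int]) -> dict[int, int]:
--     '''
--         Input: list of shipment weights
--         Output: a dict[weight, freq]
--     '''
--     weights = {}
--     for e in l:
--         if weights.get(e, None) is None:
--             weights[e] = 1
--         else:
--             weights[e] += 1
--     return weights
--
-- def get_min_shimpments(freq: int) -> int:
--     '''
--         Returns the number of shipments based to freq of same weighhts
--     '''
--     return freq//3 + (freq % 3 != 0) if freq > 1 else -1
--
-- def find_min_shipments(l: list) -> int: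
--     weights = build_min_shipments_dict(l)
--     sum = 0
--     for v in weights.values():
--         mins = get_min_shimpments(v)
--         if mins == -1:
--             return -1
--         else:
--             sum += mins
--     return sum
-- ===== SOURCE B (Python) =====
-- def find_min_shipments(l: list) -> int:
--     # Sort, then scan consecutive equal-value runs; no frequency dict.
--     total = 0
--     s = sorted(l)
--     while s:
--         x = s[0]
--         i = 1
--         n = len(s)
--         while i < n and s[i] == x:
--             i += 1
--         if i == 1:
--             return -1
--         total += i // 3 + (i % 3 != 0)
--         s = s[i:]
--     return total
-- ===== Notes on version B (the rewrite author's own statement) =====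
-- stated objective: alternative
-- what changed: Replaces the frequency dict plus a loop over its values by sorting a copy of the list and scanning consecutive equal runs, turning each run length directly into shipments.
import Mathlib
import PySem

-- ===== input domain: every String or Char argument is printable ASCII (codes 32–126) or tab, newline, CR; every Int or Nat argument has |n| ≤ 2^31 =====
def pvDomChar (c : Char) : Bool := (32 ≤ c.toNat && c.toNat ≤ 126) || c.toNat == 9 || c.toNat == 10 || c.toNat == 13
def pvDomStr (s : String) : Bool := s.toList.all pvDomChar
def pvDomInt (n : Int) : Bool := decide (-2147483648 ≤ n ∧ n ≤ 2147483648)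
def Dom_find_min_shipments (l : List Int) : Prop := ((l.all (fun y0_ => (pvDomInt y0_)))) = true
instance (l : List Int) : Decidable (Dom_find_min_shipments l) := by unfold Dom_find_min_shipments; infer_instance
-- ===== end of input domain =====

-- B replaces A's frequency dict by sorting a copy and scanning consecutive equal runs (alternative algorithm, same results).

-- ===== PORT A =====
def build_min_shipments_dict (l : List Int) : PySem.Dict Int Int :=
  l.foldl (fun weights e =>
    match weights.get? e with
    | none => weights.insert e 1
    | some v => weights.insert e (v + 1)) PySem.Dict.empty

def get_min_shimpments (freq : Int) : Int :=
  if freq > 1 then PySem.Int.floordiv freq 3 + (if PySem.Int.mod freq 3 ≠ 0 then 1 else 0) else -1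

-- A's 'for v in weights.values(): … return -1 / sum += mins'
def findGoA : List Int → Int → Int
  | [], s => s
  | v :: rest, s =>
    let mins := get_min_shimpments v
    if mins = -1 then -1 else findGoA rest (s + mins)

def find_min_shipments (l : List Int) : Int :=
  findGoA (build_min_shipments_dict l).values 0

-- ===== PORT B =====
-- B's outer while: head x, inner while counts the leading run (takeWhile), slice s[i:] drops it (dropWhile)
def altGo : List Int → Int → Int
  | [], total => total
  | x :: xs, total =>
    let run : Int := 1 + ((xs.takeWhile (fun y => y == x)).length : Int)
    if run = 1 then -1
    else altGo (xs.dropWhile (fun y => y == x))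
      (total + (PySem.Int.floordiv run 3 + if PySem.Int.mod run 3 ≠ 0 then 1 else 0))
  termination_by s _ => s.length
  decreasing_by
    simp only [List.length_cons]
    exact Nat.lt_succ_of_le (List.length_dropWhile_le _ _)

def find_min_shipments_alt (l : List Int) : Int :=
  altGo (PySem.List.sorted l (fun x => x) false) 0

-- ===== PRECONDITION & SPEC =====
def Spec_find_min_shipments (l : List Int) (out : Int) : Prop := out = find_min_shipments_alt l
instance (l : List Int) (out : Int) : Decidable (Spec_find_min_shipments l out) := by unfold Spec_find_min_shipments; infer_instance

-- ===== CLAIM (what is proved, stated in full; the proofs are below) =====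
def Claim_equal_find_min_shipments : Prop := ∀ (l : List Int), Dom_find_min_shipments l → Spec_find_min_shipments l (find_min_shipments l)

-- ===== LEMMAS AND PROOFS =====

lemma gm_nonneg_of_two_le (c : Int) (h : 2 ≤ c) : 0 ≤ get_min_shimpments c := by
  unfold get_min_shimpments
  rw [if_pos (by omega), PySem.Int.floordiv_eq_ediv_of_pos (by norm_num)]
  split_ifs <;> omega

lemma build_eq_counter (l : List Int) : build_min_shipments_dict l = PySem.Dict.counter l := by
  rw [← PySem.Dict.foldl_insert_getD_add_one_eq_counter]
  unfold build_min_shipments_dict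
  congr 1
  funext d e
  rw [PySem.Dict.getD_eq_get?_getD]
  cases h : d.get? e <;> simp

lemma values_counter_eq (l : List Int) :
    (PySem.Dict.counter l).values = (PySem.Set.ofList l).map (fun k => (l.count k : Int)) := by
  show (PySem.Dict.counter l).items.map Prod.snd = _
  rw [PySem.Dict.items_counter, List.map_map]
  rfl

lemma findGoA_eq (vs : List Int) (s : Int) :
    findGoA vs s = if ∃ v ∈ vs, get_min_shimpments v = -1 then -1
                   else s + (vs.map get_min_shimpments).sum := by
  induction vs generalizing s with
  | nil => simp [findGoA]
  | cons v rest ih =>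
    simp only [findGoA]
    by_cases h : get_min_shimpments v = -1
    · simp [h]
    · rw [if_neg h, ih]
      by_cases h2 : ∃ u ∈ rest, get_min_shimpments u = -1
      · simp [h, h2]
      · have hnone : ¬ ∃ u ∈ v :: rest, get_min_shimpments u = -1 := by
          rintro ⟨u, hu, hue⟩
          rcases List.mem_cons.mp hu with rfl | hu'
          · exact h hue
          · exact h2 ⟨u, hu', hue⟩
        rw [if_neg h2, if_neg hnone]
        simp only [List.map_cons, List.sum_cons]
        ring

lemma not_mem_dropWhile_of_sorted (x : Int) (xs : List Int)
    (hp : xs.Pairwise (· ≤ ·)) (h : ∀ y ∈ xs, x ≤ y) :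
    x ∉ xs.dropWhile (fun y => y == x) := by
  induction xs with
  | nil => simp
  | cons y ys ih =>
    rw [List.dropWhile_cons]
    by_cases hy : (y == x) = true
    · rw [if_pos hy]
      exact ih hp.of_cons (fun z hz => h z (List.mem_cons_of_mem _ hz))
    · rw [if_neg hy]
      intro hmem
      have hxy : x ≤ y := h y (List.mem_cons_self)
      have hne : y ≠ x := by simpa using hy
      rcases List.mem_cons.mp hmem with rfl | hx
      · exact hne rfl
      · exact hne (le_antisymm (List.rel_of_pairwise_cons hp hx) hxy)

lemma takeWhile_all_eq (x : Int) (xs : List Int) :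
    ∀ y ∈ xs.takeWhile (fun y => y == x), y = x := by
  intro y hy
  have := List.mem_takeWhile_imp hy
  simpa using this

lemma altGo_eq (n : Nat) : ∀ (s : List Int), s.length ≤ n → s.Pairwise (· ≤ ·) → ∀ (total : Int),
    altGo s total = if ∃ k ∈ s, get_min_shimpments ((s.count k : Int)) = -1 then -1
                    else total + ((PySem.List.dedup s).map (fun k => get_min_shimpments ((s.count k : Int)))).sum := by
  induction n with
  | zero =>
    intro s hlen _ total
    have : s = [] := List.length_eq_zero_iff.mp (Nat.le_zero.mp hlen)
    subst this; simp [altGo, PySem.List.dedup]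
  | succ n ih =>
    intro s hlen hp total
    match s with
    | [] => simp [altGo, PySem.List.dedup]
    | x :: xs =>
      set t := xs.takeWhile (fun y => y == x) with ht
      set d := xs.dropWhile (fun y => y == x) with hd
      have hxs : xs = t ++ d := (List.takeWhile_append_dropWhile).symm
      have hta : ∀ y ∈ t, y = x := takeWhile_all_eq x xs
      have hxd : x ∉ d := not_mem_dropWhile_of_sorted x xs hp.of_cons
        (fun y hy => List.rel_of_pairwise_cons hp hy)
      have hdp : d.Pairwise (· ≤ ·) := List.Pairwise.sublist (List.dropWhile_sublist _) hp.of_cons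
      have hdlen : d.length ≤ n := by
        have := congrArg List.length hxs
        simp only [List.length_cons, List.length_append] at hlen this
        omega
      -- counts
      have hcx : (x :: xs).count x = 1 + t.length := by
        rw [hxs, List.count_cons_self, List.count_append]
        have h1 : t.count x = t.length := List.count_eq_length.mpr (fun b hb => (hta b hb).symm)
        have h2 : d.count x = 0 := List.count_eq_zero.mpr hxd
        omega
      have hck : ∀ k, k ≠ x → (x :: xs).count k = d.count k := by
        intro k hk
        rw [hxs, List.count_cons_of_ne (Ne.symm hk), List.count_append, List.count_eq_zero.mpr, Nat.zero_add]
        intro hkt; exact hk (hta k hkt)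
      have hmem : ∀ k, k ∈ x :: xs ↔ k = x ∨ k ∈ d := by
        intro k
        constructor
        · intro hk
          rcases List.mem_cons.mp hk with rfl | hk'
          · exact Or.inl rfl
          · rw [hxs] at hk'
            rcases List.mem_append.mp hk' with h' | h'
            · exact Or.inl (hta k h')
            · exact Or.inr h'
        · rintro (rfl | hk)
          · exact List.mem_cons_self
          · rw [hxs]; exact List.mem_cons_of_mem _ (List.mem_append_right _ hk)
      by_cases hrun : t = []
      · -- singleton run: B returns -1, and x has count 1
        have hcx1 : (x :: xs).count x = 1 := by rw [hcx, hrun]; rfl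
        have hcond : ∃ k ∈ x :: xs, get_min_shimpments (((x :: xs).count k : Int)) = -1 :=
          ⟨x, List.mem_cons_self, by rw [hcx1]; decide⟩
        rw [if_pos hcond]
        show altGo (x :: xs) total = -1
        rw [altGo]
        simp only [← ht, hrun]
        norm_num
      · -- run ≥ 2
        have htpos : 1 ≤ t.length := List.length_pos_iff.mpr hrun
        have hrunval : (1 : Int) + (t.length : Int) ≠ 1 := by
          have : (1:Int) ≤ (t.length : Int) := by exact_mod_cast htpos
          omega
        have hgm : get_min_shimpments ((1 : Int) + (t.length : Int)) =
            PySem.Int.floordiv (1 + (t.length : Int)) 3 +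
              (if PySem.Int.mod (1 + (t.length : Int)) 3 ≠ 0 then 1 else 0) := by
          unfold get_min_shimpments
          rw [if_pos]
          have : (1:Int) ≤ (t.length : Int) := by exact_mod_cast htpos
          omega
        have hstep : altGo (x :: xs) total =
            altGo d (total + get_min_shimpments ((1 : Int) + (t.length : Int))) := by
          rw [altGo]
          simp only [← ht, ← hd]
          rw [if_neg hrunval, hgm]
        rw [hstep, ih d hdlen hdp]
        -- bridge conditions
        have hgmx : get_min_shimpments (((x :: xs).count x : Int)) ≠ -1 := by
          rw [hcx]
          have h0 : (2:Int) ≤ ((1 + t.length : Nat) : Int) := by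
            push_cast; omega
          have := gm_nonneg_of_two_le _ h0
          omega
        have hcond : (∃ k ∈ x :: xs, get_min_shimpments (((x :: xs).count k : Int)) = -1) ↔
            (∃ k ∈ d, get_min_shimpments ((d.count k : Int)) = -1) := by
          constructor
          · rintro ⟨k, hk, hke⟩
            rcases (hmem k).mp hk with rfl | hkd
            · exact absurd hke hgmx
            · have hkx : k ≠ x := fun h => hxd (h ▸ hkd)
              exact ⟨k, hkd, by rwa [hck k hkx] at hke⟩
          · rintro ⟨k, hk, hke⟩
            have hkx : k ≠ x := fun h => hxd (h ▸ hk)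
            exact ⟨k, (hmem k).mpr (Or.inr hk), by rwa [hck k hkx]⟩
        -- sum over dedup
        have hperm : (PySem.List.dedup (x :: xs)).Perm (x :: PySem.List.dedup d) := by
          rw [List.perm_ext_iff_of_nodup (PySem.List.nodup_dedup _)]
          · intro a
            rw [PySem.List.mem_dedup _ _, hmem a, List.mem_cons, PySem.List.mem_dedup]
          · exact List.nodup_cons.mpr ⟨fun h => hxd ((PySem.List.mem_dedup _ _).mp h), PySem.List.nodup_dedup _⟩
        have hsum : ((PySem.List.dedup (x :: xs)).map
              (fun k => get_min_shimpments (((x :: xs).count k : Int)))).sum =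
            get_min_shimpments ((1 : Int) + (t.length : Int)) +
            ((PySem.List.dedup d).map (fun k => get_min_shimpments ((d.count k : Int)))).sum := by
          rw [(hperm.map _).sum_eq]
          simp only [List.map_cons, List.sum_cons]
          congr 1
          · rw [hcx]; push_cast; ring_nf
          · apply congrArg
            apply List.map_congr_left
            intro k hk
            have hkd : k ∈ d := (PySem.List.mem_dedup _ _).mp hk
            have hkx : k ≠ x := fun h => hxd (h ▸ hkd)
            rw [hck k hkx]
        by_cases h2 : ∃ k ∈ d, get_min_shimpments ((d.count k : Int)) = -1
        · rw [if_pos h2, if_pos (hcond.mpr h2)]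
        · rw [if_neg h2, if_neg (fun hc => h2 (hcond.mp hc)), hsum]; ring

-- the common closed form both ports reach
lemma find_A_closed (l : List Int) :
    find_min_shipments l = if ∃ k ∈ l, get_min_shimpments ((l.count k : Int)) = -1 then -1
                           else ((PySem.Set.ofList l).map (fun k => get_min_shimpments ((l.count k : Int)))).sum := by
  unfold find_min_shipments
  rw [build_eq_counter, values_counter_eq, findGoA_eq]
  have hc : (∃ v ∈ (PySem.Set.ofList l).map (fun k => (l.count k : Int)), get_min_shimpments v = -1) ↔
      (∃ k ∈ l, get_min_shimpments ((l.count k : Int)) = -1) := by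
    constructor
    · rintro ⟨v, hv, hve⟩
      obtain ⟨k, hk, rfl⟩ := List.mem_map.mp hv
      exact ⟨k, (PySem.Set.mem_ofList _ _).mp hk, hve⟩
    · rintro ⟨k, hk, hke⟩
      exact ⟨(l.count k : Int), List.mem_map.mpr ⟨k, (PySem.Set.mem_ofList _ _).mpr hk, rfl⟩, hke⟩
  rw [List.map_map]
  by_cases h : ∃ k ∈ l, get_min_shimpments ((l.count k : Int)) = -1
  · rw [if_pos (hc.mpr h), if_pos h]
  · rw [if_neg (fun hx => h (hc.mp hx)), if_neg h, Int.zero_add]; rfl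

lemma find_B_closed (l : List Int) :
    find_min_shipments_alt l = if ∃ k ∈ l, get_min_shimpments ((l.count k : Int)) = -1 then -1
                           else ((PySem.List.dedup (PySem.List.sorted l (fun x => x) false)).map
                             (fun k => get_min_shimpments ((l.count k : Int)))).sum := by
  unfold find_min_shipments_alt
  have hperm : (PySem.List.sorted l (fun x => x) false).Perm l := PySem.List.sorted_perm l _ _
  have hpw : (PySem.List.sorted l (fun x => x) false).Pairwise (· ≤ ·) := by
    have := PySem.List.sorted_pairwise (xs := l) (key := fun x => x)
    simpa using this
  rw [altGo_eq (PySem.List.sorted l (fun x => x) false).length _ le_rfl hpw 0]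
  have hcnt : ∀ k, ((PySem.List.sorted l (fun x => x) false).count k) = l.count k :=
    fun k => hperm.count_eq k
  have hc : (∃ k ∈ PySem.List.sorted l (fun x => x) false,
        get_min_shimpments (((PySem.List.sorted l (fun x => x) false).count k : Int)) = -1) ↔
      (∃ k ∈ l, get_min_shimpments ((l.count k : Int)) = -1) := by
    constructor
    · rintro ⟨k, hk, hke⟩
      exact ⟨k, (PySem.List.mem_sorted _ _ _ _).mp hk, by rwa [hcnt k] at hke⟩
    · rintro ⟨k, hk, hke⟩
      exact ⟨k, (PySem.List.mem_sorted _ _ _ _).mpr hk, by rwa [hcnt k]⟩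
  by_cases h : ∃ k ∈ l, get_min_shimpments ((l.count k : Int)) = -1
  · rw [if_pos (hc.mpr h), if_pos h]
  · rw [if_neg (fun hx => h (hc.mp hx)), if_neg h, Int.zero_add]
    apply congrArg
    apply List.map_congr_left
    intro k _
    rw [hcnt k]

-- ===== VERDICT (by name: the statement is the Claim_ definition above) =====
theorem find_min_shipments_spec : Claim_equal_find_min_shipments := by
  intro l _
  unfold Spec_find_min_shipments
  rw [find_A_closed, find_B_closed]
  split_ifs with h
  · rfl
  · have hperm : (PySem.List.dedup (PySem.List.sorted l (fun x => x) false)).Perm (PySem.Set.ofList l) := by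
      rw [List.perm_ext_iff_of_nodup (PySem.List.nodup_dedup _) (PySem.Set.nodup_ofList _)]
      intro a
      rw [PySem.List.mem_dedup _ _, PySem.List.mem_sorted, PySem.Set.mem_ofList]
    exact ((hperm.map _).sum_eq).symm
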